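-- pv_equiv track=rewrite | github.com/m0nstereXe/CG | main.py | split_components_from_adj
-- ===== SOURCE A (Python) =====
-- def normalize_edge(u: int, v: int) -> tuple[int, int]:
--     return (u, v) if u < v else (v, u)
--
-- def split_components_from_adj(
--     adjacency: dict[int, set[int]], cut_edges: set[tuple[int, int]]
-- ) -> list[set[int]]:
--     visited: set[int] = set()
--     components: list[set[int]] = []
--     for vertex in adjacency:
--         if vertex in visited:
--             continue
--         stack = [vertex]
--         visited.add(vertex)
--         component: set[int] = set()
--         while stack:
--             node = stack.pop()
--             component.add(node)
--             for neighbor in adjacency[node]: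
--                 edge = normalize_edge(node, neighbor)
--                 if edge in cut_edges:
--                     continue
--                 if neighbor in visited:
--                     continue
--                 visited.add(neighbor)
--                 stack.append(neighbor)
--         components.append(component)
--     return components
-- ===== SOURCE B (Python) =====
-- def normalize_edge(u: int, v: int) -> tuple[int, int]:
--     return (u, v) if u < v else (v, u)
--
-- def split_components_from_adj(
--     adjacency: dict[int, set[int]], cut_edges: set[tuple[int, int]]
-- ) -> list[set[int]]:
--     # Stage 1: delete every cut edge up front, producing a pruned adjacency map.
--     pruned = {
--         u: [v for v in nbrs if normalize_edge(u, v) not in cut_edges]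
--         for u, nbrs in adjacency.items()
--     }
--     # Stage 2: recursive flood fill of the pruned graph.  A node claims all its
--     # still-unclaimed neighbours at once, then recurses into them newest-first.
--     visited: set[int] = set()
--
--     def visit(node: int, component: set[int]) -> None:
--         component.add(node)
--         fresh = []
--         for nb in pruned[node]:
--             if nb not in visited:
--                 visited.add(nb)
--                 fresh.append(nb)
--         for nb in reversed(fresh):
--             visit(nb, component)
--
--     components: list[set[int]] = []
--     for start in pruned:
--         if start not in visited:
--             visited.add(start)
--             component: set[int] = set()
--             visit(start, component)
--             components.append(component)
--     return components
-- ===== Notes on version B (the rewrite author's own statement) =====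
-- stated objective: alternative
-- what changed: B deletes all cut edges in a staged preprocessing pass and then computes each component by recursive flood fill on the call stack (each node batch-claims its unclaimed neighbours and recurses into them newest-first), replacing A's explicit-stack while-loop with per-neighbour normalize/cut tests inside the traversal.
import Mathlib
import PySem

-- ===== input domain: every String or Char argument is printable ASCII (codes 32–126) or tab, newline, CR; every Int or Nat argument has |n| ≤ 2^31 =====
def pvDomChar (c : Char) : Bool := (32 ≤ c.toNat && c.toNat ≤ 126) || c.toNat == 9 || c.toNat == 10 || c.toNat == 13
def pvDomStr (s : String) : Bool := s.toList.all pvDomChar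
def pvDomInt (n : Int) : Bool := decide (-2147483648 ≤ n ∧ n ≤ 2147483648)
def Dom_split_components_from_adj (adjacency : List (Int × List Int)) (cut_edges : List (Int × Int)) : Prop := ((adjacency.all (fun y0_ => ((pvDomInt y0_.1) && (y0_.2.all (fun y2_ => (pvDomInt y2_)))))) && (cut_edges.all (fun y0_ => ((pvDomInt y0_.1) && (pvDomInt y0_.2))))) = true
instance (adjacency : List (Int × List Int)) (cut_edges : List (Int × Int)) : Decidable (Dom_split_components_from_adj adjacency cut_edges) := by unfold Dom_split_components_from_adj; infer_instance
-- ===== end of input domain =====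

-- B stages the work differently: it deletes the cut edges in a preprocessing pass and then runs a
-- recursive flood fill (each node batch-claims its unclaimed neighbours, then recurses newest-first)
-- instead of A's explicit-stack while-loop with per-neighbour edge tests; objective: alternative
-- decomposition, same asymptotic cost.

-- ===== PORT A =====
-- normalize_edge (module helper used by both versions)
def pvNormEdge (u v : Int) : Int × Int := if u < v then (u, v) else (v, u)

-- A's inner 'for neighbor in adjacency[node]' loop; the stack is kept top-at-head (append = cons)
def pvScanA (cut : PySem.Set (Int × Int)) (node : Int) (ns : List Int)
    (vs : PySem.Set Int) (st : List Int) : PySem.Set Int × List Int :=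
  ns.foldl (fun acc nb =>
    if PySem.Set.contains cut (pvNormEdge node nb) then acc
    else if PySem.Set.contains acc.1 nb then acc
    else (PySem.Set.add acc.1 nb, nb :: acc.2)) (vs, st)

-- A's 'while stack:' loop.  fuel bounds the iteration count; the caller passes
-- 1 + |adjacency| + Σ|neighbour lists|, an upper bound on the pops of any run (each pop is the
-- initial seed or a push, and each push strictly grows the visited set, whose elements all come
-- from the keys or the neighbour lists), so the fuel-0 branch is never taken.
-- adjacency[node] on a missing key raises KeyError in Python (excluded by Pre_); modelled by getD.
def pvWhileA (adj : PySem.Dict Int (List Int)) (cut : PySem.Set (Int × Int)) :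
    Nat → List Int → PySem.Set Int → PySem.Set Int → PySem.Set Int × PySem.Set Int
  | 0, _, vs, comp => (vs, comp)
  | _ + 1, [], vs, comp => (vs, comp)
  | fuel + 1, node :: st, vs, comp =>
      let comp' := PySem.Set.add comp node
      let p := pvScanA cut node (adj.getD node []) vs st
      pvWhileA adj cut fuel p.2 p.1 comp'

def split_components_from_adj (adjacency : List (Int × List Int)) (cut_edges : List (Int × Int)) : List (List Int) :=
  let adj := PySem.Dict.ofList adjacency
  let cut := PySem.Set.ofList cut_edges
  let fuel := 1 + adjacency.length + (adjacency.map (fun p => p.2.length)).sum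
  (adj.keys.foldl (fun acc v =>
      if PySem.Set.contains acc.1 v then acc
      else
        let r := pvWhileA adj cut fuel [v] (PySem.Set.add acc.1 v) PySem.Set.empty
        (r.1, acc.2 ++ [r.2]))
    ((PySem.Set.empty : PySem.Set Int), ([] : List (List Int)))).2

-- ===== PORT B =====
-- Stage 1: the pruned adjacency map.  The dict comprehension runs over adjacency.items(), whose
-- keys are already unique, so it is exactly this map over the items list.
def pvPruneB (adjacency : List (Int × List Int)) (cut : PySem.Set (Int × Int)) : PySem.Dict Int (List Int) :=
  PySem.Dict.mk ((PySem.Dict.ofList adjacency).items.map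
    (fun p => (p.1, p.2.filter (fun v => !(PySem.Set.contains cut (pvNormEdge p.1 v))))))

-- B's 'fresh' loop: claim (mark) the unclaimed neighbours, keeping their order
def pvCollect (ns : List Int) (vs : PySem.Set Int) : PySem.Set Int × List Int :=
  ns.foldl (fun acc nb =>
    if PySem.Set.contains acc.1 nb then acc
    else (PySem.Set.add acc.1 nb, acc.2 ++ [nb])) (vs, [])

-- B's recursive visit(node, component) and its 'for nb in reversed(fresh): visit(nb, …)' loop.
-- fuel bounds the number of visit calls (one unit per call, threaded through the sibling loop);
-- the caller passes 1 + |adjacency| + Σ|neighbour lists|, an upper bound on the visits of any run,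
-- so the fuel-0 branch is never taken.  The 'min r.1 fuel' is pure fuel plumbing for the
-- termination measure; it never binds, since the threaded fuel never increases (pvRunB_fuel_le).
-- (pvLexMin is cited by the mutual definition's decreasing_by, so it must precede it.)
theorem pvLexMin (a fuel l1 l2 : Nat) (h : l1 < l2) :
    Prod.Lex (· < ·) (· < ·) (min a fuel, l1) (fuel, l2) := by
  rcases Nat.lt_or_ge (min a fuel) fuel with h1 | h1
  · exact Prod.Lex.left _ _ h1
  · have h2 : min a fuel = fuel := Nat.le_antisymm (Nat.min_le_right _ _) h1
    rw [h2]; exact Prod.Lex.right _ h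

mutual
def pvVisitB (padj : PySem.Dict Int (List Int)) :
    Nat → Int → PySem.Set Int → PySem.Set Int → Nat × PySem.Set Int × PySem.Set Int
  | 0, _, vs, comp => (0, vs, comp)
  | fuel + 1, node, vs, comp =>
      let comp' := PySem.Set.add comp node
      let p := pvCollect (padj.getD node []) vs
      pvRunB padj fuel p.2.reverse p.1 comp'
  termination_by fuel _ _ _ => (fuel, 0)
  decreasing_by exact Prod.Lex.left _ _ (Nat.lt_succ_self _)
def pvRunB (padj : PySem.Dict Int (List Int)) :
    Nat → List Int → PySem.Set Int → PySem.Set Int → Nat × PySem.Set Int × PySem.Set Int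
  | fuel, [], vs, comp => (fuel, vs, comp)
  | fuel, n :: ns, vs, comp =>
      let r := pvVisitB padj fuel n vs comp
      pvRunB padj (min r.1 fuel) ns r.2.1 r.2.2
  termination_by fuel ns _ _ => (fuel, ns.length + 1)
  decreasing_by
  · exact Prod.Lex.right _ (Nat.succ_pos _)
  · exact pvLexMin _ _ _ _ (Nat.lt_succ_self _)
end

def split_components_from_adj_alt (adjacency : List (Int × List Int)) (cut_edges : List (Int × Int)) : List (List Int) :=
  let padj := pvPruneB adjacency (PySem.Set.ofList cut_edges)
  let fuel := 1 + adjacency.length + (adjacency.map (fun p => p.2.length)).sum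
  (padj.keys.foldl (fun acc v =>
      if PySem.Set.contains acc.1 v then acc
      else
        let r := pvVisitB padj fuel v (PySem.Set.add acc.1 v) PySem.Set.empty
        (r.2.1, acc.2 ++ [r.2.2]))
    ((PySem.Set.empty : PySem.Set Int), ([] : List (List Int)))).2

-- ===== PRECONDITION & SPEC =====
-- Pre_ excludes exactly the inputs on which Python A raises KeyError: a non-cut edge leading to a
-- vertex that is not a key of the adjacency dict (B raises there too).
def Pre_split_components_from_adj (adjacency : List (Int × List Int)) (cut_edges : List (Int × Int)) : Prop :=
  ∀ p ∈ (PySem.Dict.ofList adjacency).items, ∀ v ∈ p.2,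
    (PySem.Dict.ofList adjacency).contains v = true ∨ pvNormEdge p.1 v ∈ cut_edges
instance (adjacency : List (Int × List Int)) (cut_edges : List (Int × Int)) : Decidable (Pre_split_components_from_adj adjacency cut_edges) := by unfold Pre_split_components_from_adj; infer_instance
def pvWitness_split_components_from_adj : (List (Int × List Int)) × (List (Int × Int)) :=
  ([(1, [2, 3]), (2, [1]), (3, [1]), (4, [])], [(1, 2)])
def Spec_split_components_from_adj (adjacency : List (Int × List Int)) (cut_edges : List (Int × Int)) (out : List (List Int)) : Prop := out = split_components_from_adj_alt adjacency cut_edges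
instance (adjacency : List (Int × List Int)) (cut_edges : List (Int × Int)) (out : List (List Int)) : Decidable (Spec_split_components_from_adj adjacency cut_edges out) := by unfold Spec_split_components_from_adj; infer_instance

-- ===== CLAIM (what is proved, stated in full; the proofs are below) =====
def Claim_equal_split_components_from_adj : Prop := ∀ (adjacency : List (Int × List Int)) (cut_edges : List (Int × Int)), Dom_split_components_from_adj adjacency cut_edges → Pre_split_components_from_adj adjacency cut_edges → Spec_split_components_from_adj adjacency cut_edges (split_components_from_adj adjacency cut_edges)

-- ===== LEMMAS AND PROOFS =====

-- looking a key up in a value-mapped literal dict = mapping the original lookup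
theorem pvGet?_mk_map (cut : PySem.Set (Int × Int)) (l : List (Int × List Int)) (x : Int) :
    (PySem.Dict.mk (l.map (fun p => (p.1, p.2.filter (fun v => !(PySem.Set.contains cut (pvNormEdge p.1 v))))))).get? x
      = ((PySem.Dict.mk l).get? x).map (fun ns => ns.filter (fun v => !(PySem.Set.contains cut (pvNormEdge x v)))) := by
  induction l with
  | nil => simp [PySem.Dict.get?]
  | cons p rest ih =>
      obtain ⟨k, ns⟩ := p
      simp only [List.map_cons, PySem.Dict.get?_mk_cons]
      by_cases h : k = x
      · subst h; simp
      · rw [if_neg (by simp [h]), if_neg (by simp [h]), ih]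

theorem pvPruneB_getD (adjacency : List (Int × List Int)) (cut : PySem.Set (Int × Int)) (x : Int) :
    (pvPruneB adjacency cut).getD x []
      = ((PySem.Dict.ofList adjacency).getD x []).filter (fun v => !(PySem.Set.contains cut (pvNormEdge x v))) := by
  have h := pvGet?_mk_map cut (PySem.Dict.ofList adjacency).items x
  rw [PySem.Dict.getD_eq_get?_getD, PySem.Dict.getD_eq_get?_getD, pvPruneB, h]
  cases (PySem.Dict.mk (PySem.Dict.ofList adjacency).items).get? x <;> rfl

theorem pvKeys_pruneB (adjacency : List (Int × List Int)) (cut : PySem.Set (Int × Int)) :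
    (pvPruneB adjacency cut).keys = (PySem.Dict.ofList adjacency).keys := by
  simp [pvPruneB, PySem.Dict.keys]

-- A's scan over the raw neighbour list = the same scan over the pre-filtered list
def pvScanFiltered (ms : List Int) (vs : PySem.Set Int) (st : List Int) : PySem.Set Int × List Int :=
  ms.foldl (fun acc nb =>
    if PySem.Set.contains acc.1 nb then acc
    else (PySem.Set.add acc.1 nb, nb :: acc.2)) (vs, st)

theorem pvScanA_eq_filtered (cut : PySem.Set (Int × Int)) (node : Int) (ns : List Int) :
    ∀ (vs : PySem.Set Int) (st : List Int),
      pvScanA cut node ns vs st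
        = pvScanFiltered (ns.filter (fun v => !(PySem.Set.contains cut (pvNormEdge node v)))) vs st := by
  induction ns with
  | nil => intro vs st; rfl
  | cons nb rest ih =>
      intro vs st
      simp only [pvScanA, pvScanFiltered, List.foldl_cons, List.filter_cons] at ih ⊢
      by_cases hc : PySem.Set.contains cut (pvNormEdge node nb) = true
      · simp only [hc, Bool.not_true, reduceIte]
        exact ih vs st
      · rw [Bool.not_eq_true] at hc
        simp only [hc, Bool.not_false, reduceIte, List.foldl_cons]
        by_cases hv : PySem.Set.contains vs nb = true
        · simp only [hv]
          exact ih vs st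
        · rw [Bool.not_eq_true] at hv
          simp only [hv]
          exact ih (PySem.Set.add vs nb) (nb :: st)

-- the cons-to-stack scan = B's collect, with the collected batch reversed onto the stack
theorem pvScanFiltered_eq_collect_gen (ms : List Int) :
    ∀ (vs : PySem.Set Int) (acc st : List Int),
      pvScanFiltered ms vs (acc.reverse ++ st)
        = ((ms.foldl (fun a nb =>
              if PySem.Set.contains a.1 nb then a
              else (PySem.Set.add a.1 nb, a.2 ++ [nb])) (vs, acc)).1,
           (ms.foldl (fun a nb =>
              if PySem.Set.contains a.1 nb then a
              else (PySem.Set.add a.1 nb, a.2 ++ [nb])) (vs, acc)).2.reverse ++ st) := by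
  induction ms with
  | nil => intro vs acc st; rfl
  | cons nb rest ih =>
      intro vs acc st
      simp only [pvScanFiltered, List.foldl_cons] at ih ⊢
      by_cases hv : PySem.Set.contains vs nb = true
      · simp only [hv, reduceIte]
        exact ih vs acc st
      · rw [Bool.not_eq_true] at hv
        simp only [hv]
        have : nb :: (acc.reverse ++ st) = (acc ++ [nb]).reverse ++ st := by simp
        rw [this]
        exact ih (PySem.Set.add vs nb) (acc ++ [nb]) st

theorem pvScanFiltered_eq_collect (ms : List Int) (vs : PySem.Set Int) (st : List Int) :
    pvScanFiltered ms vs st = ((pvCollect ms vs).1, (pvCollect ms vs).2.reverse ++ st) := by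
  have h := pvScanFiltered_eq_collect_gen ms vs [] st
  simpa [pvCollect] using h

-- the threaded fuel never increases
theorem pvRunB_fuel_le (padj : PySem.Dict Int (List Int)) (ns : List Int) :
    ∀ (fuel : Nat) (vs comp : PySem.Set Int), (pvRunB padj fuel ns vs comp).1 ≤ fuel := by
  induction ns with
  | nil => intro fuel vs comp; simp [pvRunB]
  | cons n rest ih =>
      intro fuel vs comp
      rw [pvRunB]
      exact le_trans (ih _ _ _) (Nat.min_le_right _ _)

-- with no fuel, B's sibling loop is the identity on the state
theorem pvRunB_zero (padj : PySem.Dict Int (List Int)) (ns : List Int) :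
    ∀ (vs comp : PySem.Set Int), pvRunB padj 0 ns vs comp = (0, vs, comp) := by
  induction ns with
  | nil => intro vs comp; simp [pvRunB]
  | cons n rest ih =>
      intro vs comp
      rw [pvRunB]
      simp only [pvVisitB, Nat.min_self]
      exact ih vs comp

-- MAIN CORRESPONDENCE: A's stack loop on 'xs ++ st' first performs B's recursive visits of the
-- stack segment xs (threading fuel one unit per pop = per visit), then continues on st.
theorem pvWhileA_eq_runB (adjacency : List (Int × List Int)) (cut : PySem.Set (Int × Int)) :
    ∀ (fuel : Nat) (xs st : List Int) (vs comp : PySem.Set Int),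
      pvWhileA (PySem.Dict.ofList adjacency) cut fuel (xs ++ st) vs comp
        = (fun r => pvWhileA (PySem.Dict.ofList adjacency) cut r.1 st r.2.1 r.2.2)
            (pvRunB (pvPruneB adjacency cut) fuel xs vs comp) := by
  intro fuel
  induction fuel using Nat.strong_induction_on with
  | _ fuel IH =>
      intro xs st vs comp
      cases xs with
      | nil => simp only [List.nil_append, pvRunB]
      | cons n xs' =>
          cases fuel with
          | zero =>
              rw [pvRunB]
              simp only [pvVisitB, Nat.min_self, pvRunB_zero]
              rfl
          | succ g =>
              rw [List.cons_append, pvWhileA]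
              rw [pvScanA_eq_filtered, ← pvPruneB_getD adjacency cut n, pvScanFiltered_eq_collect]
              rw [pvRunB]
              simp only [pvVisitB]
              set q := pvCollect ((pvPruneB adjacency cut).getD n []) vs with hq
              have h1 := IH g (Nat.lt_succ_self g) q.2.reverse (xs' ++ st) q.1 (PySem.Set.add comp n)
              rw [h1]
              set r1 := pvRunB (pvPruneB adjacency cut) g q.2.reverse q.1 (PySem.Set.add comp n) with hr1
              have hle : r1.1 ≤ g := pvRunB_fuel_le _ _ _ _ _
              have hmin : min r1.1 (g + 1) = r1.1 := Nat.min_eq_left (Nat.le_succ_of_le hle)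
              rw [hmin]
              exact IH r1.1 (Nat.lt_succ_of_le hle) xs' st r1.2.1 r1.2.2

-- one seeded component: A's whole while-loop = B's single recursive visit call
theorem pvSeed_eq (adjacency : List (Int × List Int)) (cut : PySem.Set (Int × Int))
    (fuel : Nat) (v : Int) (vs comp : PySem.Set Int) :
    pvWhileA (PySem.Dict.ofList adjacency) cut fuel [v] vs comp
      = ((pvVisitB (pvPruneB adjacency cut) fuel v vs comp).2.1,
         (pvVisitB (pvPruneB adjacency cut) fuel v vs comp).2.2) := by
  have h := pvWhileA_eq_runB adjacency cut fuel [v] [] vs comp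
  simp only [List.append_nil] at h
  rw [h, pvRunB]
  simp only [pvRunB]
  set r := pvVisitB (pvPruneB adjacency cut) fuel v vs comp with hr
  cases hf : (min r.1 fuel) with
  | zero => rfl
  | succ m => rfl

-- the two outer for-loops over the (equal) key lists
theorem pvOuter_eq (adjacency : List (Int × List Int)) (cut : PySem.Set (Int × Int)) (fuel : Nat)
    (ks : List Int) :
    ∀ (acc : PySem.Set Int × List (List Int)),
      ks.foldl (fun acc v =>
        if PySem.Set.contains acc.1 v then acc
        else
          let r := pvWhileA (PySem.Dict.ofList adjacency) cut fuel [v] (PySem.Set.add acc.1 v) PySem.Set.empty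
          (r.1, acc.2 ++ [r.2])) acc
      = ks.foldl (fun acc v =>
        if PySem.Set.contains acc.1 v then acc
        else
          let r := pvVisitB (pvPruneB adjacency cut) fuel v (PySem.Set.add acc.1 v) PySem.Set.empty
          (r.2.1, acc.2 ++ [r.2.2])) acc := by
  intro acc
  simp only [pvSeed_eq]

-- ===== VERDICT (by name: the statement is the Claim_ definition above) =====
theorem split_components_from_adj_spec : Claim_equal_split_components_from_adj := by
  intro adjacency cut_edges _ _
  unfold Spec_split_components_from_adj split_components_from_adj split_components_from_adj_alt
  simp only [pvKeys_pruneB]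
  rw [pvOuter_eq]
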